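-- pv_equiv track=rewrite | github.com/gonza2323/Algoritmos2 | practicas/tp-hashtable/code/dictionary.py | postalCodeHash
-- ===== SOURCE A (Python) =====
-- def postalCodeHash(code):
--     code = code.upper()
--
--     # Cantidad de valores posibles por posición del código postal
--     ranges = [26, 10, 10, 10, 10, 26, 26, 26]
--     currentBase = 1 # Base con la cual multiplicar a un caracter
--     codeHash = 0    # Hash que se está calculando
--
--     # Recorremos el código postal de derecha a izquierda
--     # Multiplicamos al valor (mapeado de 0 a 25 para las letras)
--     # por la base actual y lo sumamos al hash. Luego actualizamos la base.
--     for i in range(len(code) - 1, -1, -1):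
--         if code[i].isalpha():
--             codeHash += (ord(code[i]) - 65 ) * currentBase
--         else:
--             codeHash += int(code[i]) * currentBase
--         currentBase *= ranges[i]
--
--     return codeHash
-- ===== SOURCE B (Python) =====
-- def postalCodeHash(code):
--     ranges = [26, 10, 10, 10, 10, 26, 26, 26]
--     h = 0
--     for i, ch in enumerate(code.upper()):
--         h = h * ranges[i] + (ord(ch) - 65 if ch.isalpha() else int(ch))
--     return h
-- ===== Notes on version B (the rewrite author's own statement) =====
-- stated objective: idiomatic
-- what changed: Replaced the right-to-left scan that maintains a separate running base with a single-accumulator left-to-right Horner evaluation over enumerate(code.upper()).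
import Mathlib
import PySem

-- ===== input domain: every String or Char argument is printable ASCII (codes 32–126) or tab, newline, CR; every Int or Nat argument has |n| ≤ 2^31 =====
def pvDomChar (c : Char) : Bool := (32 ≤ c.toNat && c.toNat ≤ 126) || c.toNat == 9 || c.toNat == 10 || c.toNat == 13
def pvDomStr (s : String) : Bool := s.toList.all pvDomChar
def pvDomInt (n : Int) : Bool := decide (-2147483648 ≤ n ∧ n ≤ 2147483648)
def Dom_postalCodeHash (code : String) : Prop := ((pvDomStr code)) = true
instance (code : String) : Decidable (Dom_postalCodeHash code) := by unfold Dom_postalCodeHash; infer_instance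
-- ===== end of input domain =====

-- B replaces A's right-to-left scan with a separate running base by a left-to-right
-- Horner evaluation with a single accumulator (idiomatic; same value on all valid codes).


-- ===== PORT A =====
def postalCodeHash (code : String) : Int :=
  let cs := PySem.Chars.upper code.toList
  let ranges : List Int := [26, 10, 10, 10, 10, 26, 26, 26]
  ((PySem.List.pyRange ((cs.length : Int) - 1) (-1) (-1)).foldl
    (fun (st : Int × Int) i =>
      let c := PySem.List.pyGetD cs i ' '
      (st.1 * PySem.List.pyGetD ranges i 0,
       st.2 + (if PySem.Chars.isalpha c then (c.toNat : Int) - 65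
               else (PySem.Int.ofChars? [c]).getD 0) * st.1))
    (1, 0)).2

-- ===== PORT B =====
def postalCodeHash_alt (code : String) : Int :=
  let ranges : List Int := [26, 10, 10, 10, 10, 26, 26, 26]
  (PySem.List.enumerate (PySem.Chars.upper code.toList) 0).foldl
    (fun h p =>
      h * PySem.List.pyGetD ranges p.1 0 +
      (if PySem.Chars.isalpha p.2 then (p.2.toNat : Int) - 65
       else (PySem.Int.ofChars? [p.2]).getD 0)) 0

-- ===== PRECONDITION & SPEC =====
-- Pre_ excludes exactly the inputs where Python A raises: codes longer than 8
-- (IndexError on ranges[i]) and codes with a non-alphanumeric character (ValueError in int()).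
def Pre_postalCodeHash (code : String) : Prop :=
  code.toList.length ≤ 8 ∧
  code.toList.all (fun c => PySem.Chars.isalpha c || PySem.Chars.isdigit c) = true
instance (code : String) : Decidable (Pre_postalCodeHash code) := by
  unfold Pre_postalCodeHash; infer_instance
def pvWitness_postalCodeHash : String := "A1"

def Spec_postalCodeHash (code : String) (out : Int) : Prop := out = postalCodeHash_alt code
instance (code : String) (out : Int) : Decidable (Spec_postalCodeHash code out) := by unfold Spec_postalCodeHash; infer_instance

-- ===== CLAIM (what is proved, stated in full; the proofs are below) =====
def Claim_equal_postalCodeHash : Prop := ∀ (code : String), Dom_postalCodeHash code → Pre_postalCodeHash code → Spec_postalCodeHash code (postalCodeHash code)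

-- ===== LEMMAS AND PROOFS =====

-- product fold pulls out its initial accumulator
theorem pvFoldMulAcc (r : Int → Int) (ks : List Int) (b : Int) :
    ks.foldl (fun p i => p * r i) b = b * ks.foldl (fun p i => p * r i) 1 := by
  induction ks generalizing b with
  | nil => simp
  | cons i ks ih =>
    simp only [List.foldl_cons]
    rw [ih (b * r i), ih (1 * r i)]
    ring

-- Horner fold is affine in its initial accumulator
theorem pvHornerShift (f r : Int → Int) (ks : List Int) (x : Int) :
    ks.foldl (fun h i => h * r i + f i) x
      = x * ks.foldl (fun p i => p * r i) 1 + ks.foldl (fun h i => h * r i + f i) 0 := by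
  induction ks generalizing x with
  | nil => simp
  | cons i ks ih =>
    simp only [List.foldl_cons]
    rw [ih (x * r i + f i), ih (0 * r i + f i), pvFoldMulAcc r ks (1 * r i)]
    ring

-- A's reversed two-accumulator fold equals B's Horner fold
theorem pvRevFold (f r : Int → Int) (ks : List Int) (b h : Int) :
    ks.reverse.foldl (fun st i => (st.1 * r i, st.2 + f i * st.1)) (b, h)
      = (b * ks.foldl (fun p i => p * r i) 1,
         h + b * ks.foldl (fun h i => h * r i + f i) 0) := by
  induction ks generalizing b h with
  | nil => simp
  | cons i ks ih =>
    simp only [List.reverse_cons, List.foldl_append, List.foldl_cons, List.foldl_nil, ih]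
    rw [pvFoldMulAcc r ks (1 * r i), pvHornerShift f r ks (0 * r i + f i)]
    rw [Prod.mk.injEq]
    exact ⟨by ring, by ring⟩

-- ===== VERDICT (by name: the statement is the Claim_ definition above) =====
theorem postalCodeHash_spec : Claim_equal_postalCodeHash := by
  intro code _ _
  simp only [Spec_postalCodeHash, postalCodeHash, postalCodeHash_alt]
  set cs := PySem.Chars.upper code.toList with hcs
  have hrev : PySem.List.pyRange ((cs.length : Int) - 1) (-1) (-1)
      = (PySem.List.pyRange 0 (cs.length : Int) 1).reverse := by
    rw [PySem.List.pyRange_neg_one_eq_reverse]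
    norm_num
  rw [hrev,
      pvRevFold
        (fun i =>
          if PySem.Chars.isalpha (PySem.List.pyGetD cs i ' ') then
            ((PySem.List.pyGetD cs i ' ').toNat : Int) - 65
          else (PySem.Int.ofChars? [PySem.List.pyGetD cs i ' ']).getD 0)
        (fun i => PySem.List.pyGetD [26, 10, 10, 10, 10, 26, 26, 26] i 0)
        (PySem.List.pyRange 0 (cs.length : Int) 1) 1 0,
      PySem.List.enumerate_eq_map_pyRange cs ' ', List.foldl_map]
  simp only [PySem.List.len_eq]
  ring_nf
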